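-- pv_equiv track=rewrite | github.com/LvanWissen/LOT17-SBSlinking16 | evaluate.py | dict_equalizer
-- ===== SOURCE A (Python) =====
-- def dict_equalizer(golddict, resultsdict):
--     """
--     The calculations should only be done on messages
--     that are in both files (gold and resultsrun),
--     otherwise this would influence the overal counts.
--
--     This function makes shure both dictionaries have the same keys.
--     """
--
--     goldset = set(golddict)
--     resultset = set(resultsdict)
--
--     non_equal = goldset.difference(resultset)
--     non_equal.update(resultset.difference(goldset))
--
--     for item in non_equal:
--
--         if item in golddict:
--             del golddict[item]
--
--         if item in resultsdict:
--             del resultsdict[item]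
--
--     return golddict, resultsdict
-- ===== SOURCE B (Python) =====
-- def dict_equalizer(golddict, resultsdict):
--     """
--     The calculations should only be done on messages
--     that are in both files (gold and resultsrun),
--     otherwise this would influence the overal counts.
--
--     This function makes shure both dictionaries have the same keys.
--     """
--     for key in list(golddict):
--         if key not in resultsdict:
--             del golddict[key]
--     for key in list(resultsdict):
--         if key not in golddict:
--             del resultsdict[key]
--     return golddict, resultsdict
-- ===== Notes on version B (the rewrite author's own statement) =====
-- stated objective: simpler
-- what changed: B drops the explicit set constructions and symmetric-difference computation entirely and instead makes two per-dict passes over snapshotted keys, deleting in each dict the keys absent from the other.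
import Mathlib
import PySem

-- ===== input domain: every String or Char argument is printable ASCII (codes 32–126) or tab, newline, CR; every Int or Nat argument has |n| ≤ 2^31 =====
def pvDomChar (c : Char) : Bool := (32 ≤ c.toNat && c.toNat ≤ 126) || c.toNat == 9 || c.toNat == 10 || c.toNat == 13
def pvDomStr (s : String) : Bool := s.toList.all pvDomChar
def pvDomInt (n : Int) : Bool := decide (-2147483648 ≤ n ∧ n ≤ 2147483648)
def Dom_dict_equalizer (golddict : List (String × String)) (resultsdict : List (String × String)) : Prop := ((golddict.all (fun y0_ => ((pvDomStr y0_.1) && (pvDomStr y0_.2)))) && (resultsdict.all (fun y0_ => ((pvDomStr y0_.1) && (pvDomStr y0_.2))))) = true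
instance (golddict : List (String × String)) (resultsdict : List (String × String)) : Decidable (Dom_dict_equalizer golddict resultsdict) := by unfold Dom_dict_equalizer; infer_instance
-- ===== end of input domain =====

-- B keeps the same in-place mutation of both argument dicts as A; the equivalence below is about the returned pair.

-- ===== PORT A =====
-- set(golddict), set(resultsdict); non_equal = goldset - resultset, updated with resultset - goldset;
-- then 'for item in non_equal: if in dict, del' (the result is independent of the set's iteration order: deletions commute).
def dict_equalizer (golddict : List (String × String)) (resultsdict : List (String × String)) : (List (String × String)) × (List (String × String)) :=
  let goldset : PySem.Set String := PySem.Set.ofList (golddict.map (·.1))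
  let resultset : PySem.Set String := PySem.Set.ofList (resultsdict.map (·.1))
  let non_equal : PySem.Set String := PySem.Set.update (PySem.Set.diff goldset resultset) (PySem.Set.diff resultset goldset)
  let st := non_equal.foldl
    (fun (st : PySem.Dict String String × PySem.Dict String String) item =>
      let g := if st.1.contains item then st.1.erase item else st.1
      let r := if st.2.contains item then st.2.erase item else st.2
      (g, r))
    (PySem.Dict.mk golddict, PySem.Dict.mk resultsdict)
  (st.1.items, st.2.items)

-- ===== PORT B =====
-- two passes: delete from golddict the keys not in resultsdict, then from resultsdict the keys not in the reduced golddict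
def dict_equalizer_alt (golddict : List (String × String)) (resultsdict : List (String × String)) : (List (String × String)) × (List (String × String)) :=
  let r0 : PySem.Dict String String := PySem.Dict.mk resultsdict
  let g := (golddict.map (·.1)).foldl
    (fun (g : PySem.Dict String String) key => if !r0.contains key then g.erase key else g)
    (PySem.Dict.mk golddict)
  let r := (resultsdict.map (·.1)).foldl
    (fun (r : PySem.Dict String String) key => if !g.contains key then r.erase key else r)
    r0
  (g.items, r.items)

-- ===== PRECONDITION & SPEC =====
def Spec_dict_equalizer (golddict : List (String × String)) (resultsdict : List (String × String)) (out : (List (String × String)) × (List (String × String))) : Prop := out = dict_equalizer_alt golddict resultsdict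
instance (golddict : List (String × String)) (resultsdict : List (String × String)) (out : (List (String × String)) × (List (String × String))) : Decidable (Spec_dict_equalizer golddict resultsdict out) := by unfold Spec_dict_equalizer; infer_instance

-- ===== CLAIM (what is proved, stated in full; the proofs are below) =====
def Claim_equal_dict_equalizer : Prop := ∀ (golddict : List (String × String)) (resultsdict : List (String × String)), Dom_dict_equalizer golddict resultsdict → Spec_dict_equalizer golddict resultsdict (dict_equalizer golddict resultsdict)

-- ===== LEMMAS AND PROOFS =====

-- erasing an absent key is the identity
theorem erase_of_not_contains (d : PySem.Dict String String) (k : String)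
    (h : d.contains k = false) : d.erase k = d := by
  apply PySem.Dict.ext
  simp only [PySem.Dict.erase]
  refine List.filter_eq_self.mpr ?_
  intro p hp
  rw [PySem.Dict.contains_eq_decide_mem_keys] at h
  simp only [decide_eq_false_iff_not, PySem.Dict.keys] at h
  have hne : p.1 ≠ k := fun hpk => h (hpk ▸ List.mem_map_of_mem hp)
  simp [hne]

-- the conditional erase in A's loop body is an unconditional erase
theorem cond_erase (d : PySem.Dict String String) (k : String) :
    (if d.contains k then d.erase k else d) = d.erase k := by
  by_cases h : d.contains k = true
  · simp [h]
  · simp only [Bool.not_eq_true] at h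
    simp [h, erase_of_not_contains d k h]

-- erase on a literal dict is a filter of its item list
theorem erase_mk (l : List (String × String)) (k : String) :
    (PySem.Dict.mk l).erase k = PySem.Dict.mk (l.filter (fun p => !(p.1 == k))) := by
  apply PySem.Dict.ext; simp [PySem.Dict.erase]

-- a fold of conditional erasures over a key list is one filter of the items
theorem foldl_cond_erase (Q : String → Bool) :
    ∀ (ks : List String) (l : List (String × String)),
      ks.foldl (fun (d : PySem.Dict String String) k => if Q k then d.erase k else d) (PySem.Dict.mk l)
      = PySem.Dict.mk (l.filter (fun p => !(Q p.1 && ks.contains p.1))) := by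
  intro ks
  induction ks with
  | nil => intro l; simp
  | cons k ks ih =>
    intro l
    by_cases hQ : Q k = true
    · rw [List.foldl_cons, if_pos hQ, erase_mk, ih]
      congr 1
      rw [List.filter_filter]
      apply List.filter_congr
      intro p _
      by_cases hpk : p.1 = k
      · simp [hpk, hQ]
      · simp [hpk]
    · simp only [Bool.not_eq_true] at hQ
      rw [List.foldl_cons, if_neg (by simp [hQ]), ih]
      congr 1
      apply List.filter_congr
      intro p _
      by_cases hpk : p.1 = k
      · simp [hpk, hQ]
      · simp [hpk]

-- unconditional form of the previous lemma
theorem foldl_erase (ks : List String) (l : List (String × String)) :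
    ks.foldl PySem.Dict.erase (PySem.Dict.mk l)
    = PySem.Dict.mk (l.filter (fun p => !(ks.contains p.1))) := by
  have h := foldl_cond_erase (fun _ => true) ks l
  simpa using h

-- A's single loop over the symmetric difference updates the two dicts independently
theorem foldl_pair (f g : PySem.Dict String String → String → PySem.Dict String String) :
    ∀ (ks : List String) (a b : PySem.Dict String String),
      ks.foldl (fun st item => (f st.1 item, g st.2 item)) (a, b)
      = (ks.foldl f a, ks.foldl g b) := by
  intro ks
  induction ks with
  | nil => intro a b; rfl
  | cons k ks ih => intro a b; simp [List.foldl_cons, ih]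

-- membership test of a dict built from a literal item list
theorem contains_mk_eq (l : List (String × String)) (k : String) :
    (PySem.Dict.mk l).contains k = (l.map (·.1)).contains k := by
  rw [PySem.Dict.contains_eq_decide_mem_keys, PySem.Dict.keys_mk]
  simp

-- A returns both dicts restricted to the common keys
theorem dict_equalizer_eq_filter (golddict resultsdict : List (String × String)) :
    dict_equalizer golddict resultsdict
    = (golddict.filter (fun p => (resultsdict.map (·.1)).contains p.1),
       resultsdict.filter (fun p => (golddict.map (·.1)).contains p.1)) := by
  unfold dict_equalizer
  simp only [cond_erase]
  rw [foldl_pair]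
  rw [foldl_erase, foldl_erase]
  simp only [Prod.mk.injEq]
  refine ⟨?_, ?_⟩
  · apply List.filter_congr
    intro p hp
    rw [Bool.eq_iff_iff]
    simp only [List.contains_iff_mem, Bool.not_eq_eq_eq_not, Bool.not_true,
      Bool.eq_false_iff, ne_eq, PySem.Set.mem_update, PySem.Set.mem_diff,
      PySem.Set.mem_ofList, List.mem_map, not_or, not_and, not_exists]
    have hg : ∃ x ∈ golddict, x.1 = p.1 := ⟨p, hp, rfl⟩
    push Not
    exact ⟨fun h => h.1 hg, fun hb => ⟨fun _ => hb, fun _ => hg⟩⟩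
  · apply List.filter_congr
    intro p hp
    rw [Bool.eq_iff_iff]
    simp only [List.contains_iff_mem, Bool.not_eq_eq_eq_not, Bool.not_true,
      Bool.eq_false_iff, ne_eq, PySem.Set.mem_update, PySem.Set.mem_diff,
      PySem.Set.mem_ofList, List.mem_map, not_or, not_and, not_exists]
    have hr : ∃ x ∈ resultsdict, x.1 = p.1 := ⟨p, hp, rfl⟩
    push Not
    exact ⟨fun h => h.2 hr, fun ha => ⟨fun _ => hr, fun _ => ha⟩⟩

-- B returns the same restrictions
theorem dict_equalizer_alt_eq_filter (golddict resultsdict : List (String × String)) :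
    dict_equalizer_alt golddict resultsdict
    = (golddict.filter (fun p => (resultsdict.map (·.1)).contains p.1),
       resultsdict.filter (fun p => (golddict.map (·.1)).contains p.1)) := by
  unfold dict_equalizer_alt
  simp only [foldl_cond_erase]
  have hgold : golddict.filter
      (fun p => !(!(PySem.Dict.mk resultsdict).contains p.1 && (golddict.map (·.1)).contains p.1))
      = golddict.filter (fun p => (resultsdict.map (·.1)).contains p.1) := by
    apply List.filter_congr
    intro p hp
    have hg : (golddict.map (·.1)).contains p.1 = true := by
      simp only [List.contains_iff_mem]
      exact List.mem_map_of_mem hp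
    rw [contains_mk_eq, hg]
    cases (resultsdict.map (·.1)).contains p.1 <;> simp
  rw [hgold]
  simp only [Prod.mk.injEq]
  refine ⟨trivial, ?_⟩
  · apply List.filter_congr
    intro p hp
    have hr : (resultsdict.map (·.1)).contains p.1 = true := by
      simp only [List.contains_iff_mem]
      exact List.mem_map_of_mem hp
    rw [contains_mk_eq, hr]
    rw [Bool.eq_iff_iff]
    simp only [Bool.and_true, Bool.not_not, List.contains_iff_mem,
      List.mem_map, List.mem_filter]
    constructor
    · rintro ⟨q, ⟨hq, _⟩, hq1⟩
      exact ⟨q, hq, hq1⟩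
    · rintro ⟨q, hq, hq1⟩
      refine ⟨q, ⟨hq, ?_⟩, hq1⟩
      rw [hq1]
      simpa using hr

-- ===== VERDICT (by name: the statement is the Claim_ definition above) =====
theorem dict_equalizer_spec : Claim_equal_dict_equalizer := by
  intro golddict resultsdict _
  unfold Spec_dict_equalizer
  rw [dict_equalizer_eq_filter, dict_equalizer_alt_eq_filter]
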